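-- pv_equiv track=rewrite | github.com/danielthetechie/the-pragmatic-programmer-challenges | topic16/address_book_db.py | getJSONFromDictionaryString
-- ===== SOURCE A (Python) =====
-- def getJSONFromDictionaryString (dictionary_string):
-- 	json_result = ""
-- 	dictionary_string = dictionary_string.replace ("', ", "',")
-- 	for c in dictionary_string:
-- 		if c == "{":
-- 			json_result += "\n\t{\n\t\t"
-- 		elif c == "'":
-- 			json_result += "\""
-- 		elif c == "}":
-- 			json_result += "\n\t}"
-- 		else:
-- 			json_result += c
--
-- 	json_result = json_result.replace ("\",", "\",\n\t\t")
-- 	json_result = json_result.replace (", \"", ",\n\t\t\"")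
-- 	json_result = json_result.replace ("},\n", "},")
-- 	json_result = json_result.replace ("}]", "}\n]")
--
-- 	return json_result
-- ===== SOURCE B (Python) =====
-- def getJSONFromDictionaryString(dictionary_string):
-- 	# Pure pipeline of whole-string replace passes: no character loop.
-- 	# The three single-char substitutions are done as separate scans, in a
-- 	# different order than A's if/elif chain ("'", then "}", then "{") --
-- 	# correct because no replacement text contains another pass's trigger.
-- 	s = dictionary_string.replace("', ", "',")
-- 	s = s.replace("'", "\"")
-- 	s = s.replace("}", "\n\t}")
-- 	s = s.replace("{", "\n\t{\n\t\t")
-- 	s = s.replace("\",", "\",\n\t\t")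
-- 	s = s.replace(", \"", ",\n\t\t\"")
-- 	s = s.replace("},\n", "},")
-- 	s = s.replace("}]", "}\n]")
-- 	return s
-- ===== Notes on version B (the rewrite author's own statement) =====
-- stated objective: simpler
-- what changed: Replaces A's manual per-character for/if-elif accumulator loop by a flat pipeline of whole-string replace passes: the three character substitutions become three separate scans applied in a different order than A's branch chain, which requires (and the Lean file proves) that the passes do not interfere.
import Mathlib
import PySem

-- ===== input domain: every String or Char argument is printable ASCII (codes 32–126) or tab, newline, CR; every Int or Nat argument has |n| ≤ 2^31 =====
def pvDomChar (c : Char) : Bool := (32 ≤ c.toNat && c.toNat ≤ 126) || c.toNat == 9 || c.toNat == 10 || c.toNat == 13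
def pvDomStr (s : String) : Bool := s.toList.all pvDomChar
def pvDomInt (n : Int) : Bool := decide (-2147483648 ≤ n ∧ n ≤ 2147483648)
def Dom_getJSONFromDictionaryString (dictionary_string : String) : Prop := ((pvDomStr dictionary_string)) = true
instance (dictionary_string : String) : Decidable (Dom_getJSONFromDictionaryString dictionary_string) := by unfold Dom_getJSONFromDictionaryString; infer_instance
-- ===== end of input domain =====

-- B replaces A's per-character for/if-elif accumulator loop by a flat pipeline of
-- whole-string replace passes, with the three character substitutions done as three
-- separate scans in a different order than A's branch chain; objective: simpler.


-- ===== PORT A =====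
-- The char loop accumulates a List Char (string concatenation done on the list side,
-- exact for Python's += on strings); str.replace is PySem.Str.replace.
def getJSONFromDictionaryString (dictionary_string : String) : String :=
  let ds := PySem.Str.replace dictionary_string "', " "',"
  let json := String.ofList (ds.toList.foldl (fun acc c =>
      if c = '{' then acc ++ ['\n', '\t', '{', '\n', '\t', '\t']
      else if c = '\'' then acc ++ ['"']
      else if c = '}' then acc ++ ['\n', '\t', '}']
      else acc ++ [c]) [])
  let j1 := PySem.Str.replace json "\"," "\",\n\t\t"
  let j2 := PySem.Str.replace j1 ", \"" ",\n\t\t\""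
  let j3 := PySem.Str.replace j2 "},\n" "},"
  PySem.Str.replace j3 "}]" "}\n]"

-- ===== PORT B =====
-- Source B: a flat chain of whole-string replace passes, single-char passes in the
-- order "'", "}", "{" (different from A's branch order).
def getJSONFromDictionaryString_alt (dictionary_string : String) : String :=
  let s1 := PySem.Str.replace dictionary_string "', " "',"
  let s2 := PySem.Str.replace s1 "'" "\""
  let s3 := PySem.Str.replace s2 "}" "\n\t}"
  let s4 := PySem.Str.replace s3 "{" "\n\t{\n\t\t"
  let s5 := PySem.Str.replace s4 "\"," "\",\n\t\t"
  let s6 := PySem.Str.replace s5 ", \"" ",\n\t\t\""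
  let s7 := PySem.Str.replace s6 "},\n" "},"
  PySem.Str.replace s7 "}]" "}\n]"

-- ===== PRECONDITION & SPEC =====
def Spec_getJSONFromDictionaryString (dictionary_string : String) (out : String) : Prop := out = getJSONFromDictionaryString_alt dictionary_string
instance (dictionary_string : String) (out : String) : Decidable (Spec_getJSONFromDictionaryString dictionary_string out) := by unfold Spec_getJSONFromDictionaryString; infer_instance

-- ===== CLAIM (what is proved, stated in full; the proofs are below) =====
def Claim_equal_getJSONFromDictionaryString : Prop := ∀ (dictionary_string : String), Dom_getJSONFromDictionaryString dictionary_string → Spec_getJSONFromDictionaryString dictionary_string (getJSONFromDictionaryString dictionary_string)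

-- ===== LEMMAS AND PROOFS =====

-- single-character replace is an independent expansion of each occurrence: flatMap form
theorem pvReplaceGo_single (c : Char) (r : List Char) :
    ∀ (fuel : Nat) (l acc : List Char), l.length ≤ fuel →
      PySem.Chars.replace.go [c] r fuel l acc
        = acc.reverse ++ l.flatMap (fun x => if x = c then r else [x]) := by
  intro fuel
  induction fuel with
  | zero =>
      intro l acc h
      have : l = [] := List.eq_nil_of_length_eq_zero (Nat.le_zero.mp h)
      subst this; simp [PySem.Chars.replace.go]
  | succ n ih =>
      intro l acc h
      cases l with
      | nil => simp [PySem.Chars.replace.go]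
      | cons x t =>
          simp only [PySem.Chars.replace.go]
          by_cases hx : x = c
          · subst hx
            have hpre : [x].isPrefixOf (x :: t) = true := by simp [List.isPrefixOf]
            simp only [hpre, if_true, List.length_cons, List.length_nil,
              Nat.zero_add, List.drop_succ_cons, List.drop_zero] at *
            rw [ih t (r.reverse ++ acc) (by omega)]
            simp
          · have hpre : [c].isPrefixOf (x :: t) = false := by
              simp [List.isPrefixOf]; exact fun hcx => (hx hcx.symm).elim
            simp only [hpre, Bool.false_eq_true, if_false]
            rw [ih t (x :: acc) (by simpa using Nat.le_of_succ_le_succ h)]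
            simp [hx]

theorem pvReplace_single (c : Char) (r : List Char) (s : List Char) :
    PySem.Chars.replace s [c] r = s.flatMap (fun x => if x = c then r else [x]) := by
  rw [PySem.Chars.replace]
  simp only [List.isEmpty_cons, Bool.false_eq_true, if_false]
  simpa using pvReplaceGo_single c r s.length s [] (le_refl _)

-- A's accumulator loop is a flatMap of its branch function
theorem pvLoop_eq_flatMap (l : List Char) (acc : List Char) :
    l.foldl (fun acc c =>
      if c = '{' then acc ++ ['\n', '\t', '{', '\n', '\t', '\t']
      else if c = '\'' then acc ++ ['"']
      else if c = '}' then acc ++ ['\n', '\t', '}']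
      else acc ++ [c]) acc
    = acc ++ l.flatMap (fun c =>
      if c = '{' then ['\n', '\t', '{', '\n', '\t', '\t']
      else if c = '\'' then ['"']
      else if c = '}' then ['\n', '\t', '}']
      else [c]) := by
  induction l generalizing acc with
  | nil => simp
  | cons c tl ih =>
      simp only [List.foldl_cons, List.flatMap_cons]
      split_ifs <;> rw [ih] <;> simp

-- the three staged single-char passes of B compose to A's one-pass branch function
theorem pvStaged_eq_loop (l : List Char) :
    ((l.flatMap (fun x => if x = '\'' then ['"'] else [x])).flatMap
        (fun x => if x = '}' then ['\n', '\t', '}'] else [x])).flatMap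
        (fun x => if x = '{' then ['\n', '\t', '{', '\n', '\t', '\t'] else [x])
    = l.flatMap (fun c =>
      if c = '{' then ['\n', '\t', '{', '\n', '\t', '\t']
      else if c = '\'' then ['"']
      else if c = '}' then ['\n', '\t', '}']
      else [c]) := by
  rw [List.flatMap_assoc, List.flatMap_assoc]
  apply List.flatMap_congr
  intro c _
  by_cases h1 : c = '{'
  · subst h1; decide
  by_cases h2 : c = '\''
  · subst h2; decide
  by_cases h3 : c = '}'
  · subst h3; decide
  simp [h1, h2, h3]

-- the translated string: A's loop output equals B's three staged replaces
theorem pvTranslate_eq (t : String) :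
    String.ofList (t.toList.foldl (fun acc c =>
      if c = '{' then acc ++ ['\n', '\t', '{', '\n', '\t', '\t']
      else if c = '\'' then acc ++ ['"']
      else if c = '}' then acc ++ ['\n', '\t', '}']
      else acc ++ [c]) [])
    = PySem.Str.replace (PySem.Str.replace (PySem.Str.replace t "'" "\"") "}" "\n\t}") "{" "\n\t{\n\t\t" := by
  apply String.toList_inj.mp
  rw [String.toList_ofList, pvLoop_eq_flatMap]
  have h1 : ("'" : String).toList = ['\''] := by decide
  have h2 : ("}" : String).toList = ['}'] := by decide
  have h3 : ("{" : String).toList = ['{'] := by decide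
  simp only [PySem.Str.toList_replace, h1, h2, h3, pvReplace_single]
  rw [← pvStaged_eq_loop]
  simp

-- ===== VERDICT (by name: the statement is the Claim_ definition above) =====
theorem getJSONFromDictionaryString_spec : Claim_equal_getJSONFromDictionaryString := by
  intro s _
  unfold Spec_getJSONFromDictionaryString getJSONFromDictionaryString getJSONFromDictionaryString_alt
  dsimp only
  rw [pvTranslate_eq]
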